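-- pv_equiv track=rewrite | github.com/akrasic/yaga2 | anomaly_models.py | _calculate_overall_severity
-- ===== SOURCE A (Python) =====
-- from typing import Dict, List
--
-- def _calculate_overall_severity(anomalies: Dict) -> str:
--         """NEW: Calculate overall severity of all anomalies"""
--         if not anomalies:
--             return 'normal'
--
--         severities = []
--         for anomaly_data in anomalies.values():
--             if isinstance(anomaly_data, dict):
--                 severities.append(anomaly_data.get('severity', 'low'))
--
--         if 'critical' in severities:
--             return 'critical'
--         elif 'high' in severities:
--             return 'high'
--         elif 'medium' in severities:
--             return 'medium'
--         else:
--             return 'low'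
-- ===== SOURCE B (Python) =====
-- from typing import Dict, List
--
-- _ORDER = {'critical': 3, 'high': 2, 'medium': 1, 'low': 0}
-- _NAME = {0: 'low', 1: 'medium', 2: 'high', 3: 'critical'}
--
-- def _calculate_overall_severity(anomalies: Dict) -> str:
--     """Highest severity via a priority table and a single running maximum."""
--     if not anomalies:
--         return 'normal'
--     best = 0
--     for anomaly_data in anomalies.values():
--         if isinstance(anomaly_data, dict):
--             best = max(best, _ORDER.get(anomaly_data.get('severity', 'low'), 0))
--     return _NAME.get(best, 'low')
-- ===== Notes on version B (the rewrite author's own statement) =====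
-- stated objective: simpler
-- what changed: Replaces building a severities list plus four ordered 'in' scans with a single pass keeping the maximum rank from a priority table, mapped back to its name.
import Mathlib
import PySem

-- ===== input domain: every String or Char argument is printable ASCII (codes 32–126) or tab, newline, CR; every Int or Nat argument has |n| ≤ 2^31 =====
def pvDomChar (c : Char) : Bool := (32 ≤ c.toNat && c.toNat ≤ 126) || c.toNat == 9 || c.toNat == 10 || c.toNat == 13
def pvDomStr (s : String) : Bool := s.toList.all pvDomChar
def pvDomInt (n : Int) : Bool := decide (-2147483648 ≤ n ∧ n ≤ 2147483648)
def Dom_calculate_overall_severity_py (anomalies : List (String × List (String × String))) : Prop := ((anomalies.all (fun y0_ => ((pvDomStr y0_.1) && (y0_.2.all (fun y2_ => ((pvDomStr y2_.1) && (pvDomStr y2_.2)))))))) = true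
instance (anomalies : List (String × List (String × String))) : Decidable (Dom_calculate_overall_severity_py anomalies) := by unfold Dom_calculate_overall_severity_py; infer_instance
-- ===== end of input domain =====

-- B is one pass keeping a running maximum over a priority table instead of a list build plus ordered membership scans; objective: simpler.

-- ===== PORT A =====
-- Typed input guarantees every dict value is a dict, so `isinstance(anomaly_data, dict)` is always true here.
def calculate_overall_severity_py (anomalies : List (String × List (String × String))) : String :=
  let d := PySem.Dict.ofList anomalies
  if d.items = [] then "normal"
  else
    let severities := d.values.foldl
      (fun acc anomaly_data => acc ++ [(PySem.Dict.ofList anomaly_data).getD "severity" "low"]) []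
    if "critical" ∈ severities then "critical"
    else if "high" ∈ severities then "high"
    else if "medium" ∈ severities then "medium"
    else "low"

-- ===== PORT B =====
def pvOrder : PySem.Dict String Int :=
  PySem.Dict.ofList [("critical", 3), ("high", 2), ("medium", 1), ("low", 0)]
def pvName : PySem.Dict Int String :=
  PySem.Dict.ofList [(0, "low"), (1, "medium"), (2, "high"), (3, "critical")]

def calculate_overall_severity_py_alt (anomalies : List (String × List (String × String))) : String :=
  let d := PySem.Dict.ofList anomalies
  if d.items = [] then "normal"
  else
    let best := d.values.foldl
      (fun b anomaly_data =>
        max b (pvOrder.getD ((PySem.Dict.ofList anomaly_data).getD "severity" "low") 0)) 0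
    pvName.getD best "low"

-- ===== PRECONDITION & SPEC =====
def Spec_calculate_overall_severity_py (anomalies : List (String × List (String × String))) (out : String) : Prop := out = calculate_overall_severity_py_alt anomalies
instance (anomalies : List (String × List (String × String))) (out : String) : Decidable (Spec_calculate_overall_severity_py anomalies out) := by unfold Spec_calculate_overall_severity_py; infer_instance

-- ===== CLAIM (what is proved, stated in full; the proofs are below) =====
def Claim_equal_calculate_overall_severity_py : Prop := ∀ (anomalies : List (String × List (String × String))), Dom_calculate_overall_severity_py anomalies → Spec_calculate_overall_severity_py anomalies (calculate_overall_severity_py anomalies)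

-- ===== LEMMAS AND PROOFS =====

-- rank of a severity string through the priority table
def pvRank (s : String) : Int := pvOrder.getD s 0

lemma pvOrder_mk : pvOrder = PySem.Dict.mk [("critical", 3), ("high", 2), ("medium", 1), ("low", 0)] := by
  decide

lemma pvRank_eq (s : String) :
    pvRank s = if s = "critical" then 3 else if s = "high" then 2
               else if s = "medium" then 1 else 0 := by
  by_cases h1 : s = "critical"
  · subst h1; decide
  by_cases h2 : s = "high"
  · subst h2; decide
  by_cases h3 : s = "medium"
  · subst h3; decide
  by_cases h4 : s = "low"
  · subst h4; decide
  have g1 : ¬("critical" = s) := fun h => h1 h.symm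
  have g2 : ¬("high" = s) := fun h => h2 h.symm
  have g3 : ¬("medium" = s) := fun h => h3 h.symm
  have g4 : ¬("low" = s) := fun h => h4 h.symm
  simp [pvRank, pvOrder_mk, PySem.Dict.getD_eq_get?_getD,
        PySem.Dict.get?, g1, g2, g3, g4, h1, h2, h3]

-- the rank of A's four-way membership chain over a severity list
def pvChainRank (ss : List String) : Int :=
  if "critical" ∈ ss then 3 else if "high" ∈ ss then 2
  else if "medium" ∈ ss then 1 else 0

lemma pvChainRank_cons (s : String) (ss : List String) :
    pvChainRank (s :: ss) = max (pvRank s) (pvChainRank ss) := by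
  simp only [pvChainRank, pvRank_eq, List.mem_cons]
  split_ifs <;> simp_all

lemma pvFold_eq (ss : List String) (acc : Int) (h : 0 ≤ acc) :
    (ss.map (fun s => pvOrder.getD s 0)).foldl max acc = max acc (pvChainRank ss) := by
  induction ss generalizing acc with
  | nil => simp [pvChainRank]; exact h
  | cons s ss ih =>
      rw [List.map_cons, List.foldl_cons, ih _ (le_trans h (le_max_left _ _)), pvChainRank_cons]
      simp only [pvRank]
      omega

lemma pvName_chain (ss : List String) :
    pvName.getD (pvChainRank ss) "low" =
      (if "critical" ∈ ss then "critical" else if "high" ∈ ss then "high"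
       else if "medium" ∈ ss then "medium" else "low") := by
  unfold pvChainRank
  split_ifs <;> decide

-- ===== VERDICT (by name: the statement is the Claim_ definition above) =====
lemma pvChainRank_nonneg (ss : List String) : 0 ≤ pvChainRank ss := by
  unfold pvChainRank; split_ifs <;> omega

theorem calculate_overall_severity_py_spec : Claim_equal_calculate_overall_severity_py := by
  intro anomalies _
  unfold Spec_calculate_overall_severity_py calculate_overall_severity_py calculate_overall_severity_py_alt
  by_cases h : (PySem.Dict.ofList anomalies).items = []
  · simp [h]
  · simp only [if_neg h]
    rw [PySem.List.foldl_append_singleton_eq_map, ← List.foldl_map]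
    simp only [List.nil_append]
    rw [show (fun anomaly_data => pvOrder.getD ((PySem.Dict.ofList anomaly_data).getD "severity" "low") 0) =
          ((fun s => pvOrder.getD s 0) ∘
           (fun (anomaly_data : List (String × String)) => (PySem.Dict.ofList anomaly_data).getD "severity" "low")) from rfl,
        ← List.map_map, pvFold_eq _ 0 le_rfl,
        max_eq_right (pvChainRank_nonneg _), pvName_chain]
    rfl
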